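-- pv_equiv track=rewrite | github.com/KHJun99/Algorithm | 프로그래머스/3/132266. 부대복귀/부대복귀.py | solution
-- ===== SOURCE A (Python) =====
-- from collections import deque
--
-- def solution(n, roads, sources, destination):
--     answer = []
--
--     delta = [(0, 1), (1, 0), (-1, 0), (-1, 0)]
--
--     graph = [[] for _ in range(n + 1)]
--     # 양방향
--     for a, b in roads:
--         graph[a].append(b)
--         graph[b].append(a)
--
--     distance = [-1] * (n + 1)
--     # 부대위치 = 0
--     distance[destination] = 0
--
--     # bfs
--     queue = deque([destination])
--     while queue:
--         current = queue.popleft()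
--
--         for next_node in graph[current]:
--             if distance[next_node] == -1:
--                 distance[next_node] = distance[current] + 1
--                 queue.append(next_node)
--
--     for source in sources:
--         answer.append(distance[source])
--
--     return answer
-- ===== SOURCE B (Python) =====
-- def solution(n, roads, sources, destination):
--     distance = [-1] * (n + 1)
--     distance[destination] = 0
--     # Bellman-Ford: no adjacency list and no queue -- sweep the raw road list,
--     # relaxing each road in both directions, up to n rounds, stopping early
--     # once a whole sweep changes nothing.
--     for _ in range(n):
--         changed = False
--         for a, b in roads:
--             if distance[a] != -1 and (distance[b] == -1 or distance[a] + 1 < distance[b]):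
--                 distance[b] = distance[a] + 1
--                 changed = True
--             if distance[b] != -1 and (distance[a] == -1 or distance[b] + 1 < distance[a]):
--                 distance[a] = distance[b] + 1
--                 changed = True
--         if not changed:
--             break
--     return [distance[s] for s in sources]
-- ===== Notes on version B (the rewrite author's own statement) =====
-- stated objective: alternative
-- what changed: Replaces BFS entirely by Bellman-Ford edge relaxation: no adjacency list and no queue are built; the raw road list is swept up to n times, relaxing each road in both directions, with an early exit once a sweep changes nothing; unit edge weights make the relaxation fixpoint equal the BFS distances.
import Mathlib
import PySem

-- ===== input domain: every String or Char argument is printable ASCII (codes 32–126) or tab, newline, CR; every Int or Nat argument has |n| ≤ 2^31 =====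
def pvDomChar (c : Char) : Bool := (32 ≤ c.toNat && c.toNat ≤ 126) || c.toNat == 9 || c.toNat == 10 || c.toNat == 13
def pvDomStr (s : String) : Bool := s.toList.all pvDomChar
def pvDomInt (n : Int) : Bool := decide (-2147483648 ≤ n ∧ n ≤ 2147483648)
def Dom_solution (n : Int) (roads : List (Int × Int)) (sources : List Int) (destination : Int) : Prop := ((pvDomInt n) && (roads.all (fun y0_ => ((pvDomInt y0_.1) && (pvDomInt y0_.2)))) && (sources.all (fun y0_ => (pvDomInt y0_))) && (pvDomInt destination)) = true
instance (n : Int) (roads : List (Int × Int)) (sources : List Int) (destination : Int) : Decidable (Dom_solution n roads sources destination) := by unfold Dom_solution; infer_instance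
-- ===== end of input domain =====

-- B replaces A's BFS (adjacency list + FIFO queue) by Bellman-Ford edge relaxation over the
-- raw road list with an early exit at the fixpoint (objective: alternative algorithm).
-- ===== PORT A =====

-- graph[a].append(b); graph[b].append(a) over all roads
def buildGraph (roads : List (Int × Int)) (g0 : List (List Int)) : List (List Int) :=
  roads.foldl (fun g ab =>
    let g1 := PySem.List.pySetD g ab.1 (PySem.List.pyGetD g ab.1 [] ++ [ab.2])
    PySem.List.pySetD g1 ab.2 (PySem.List.pyGetD g1 ab.2 [] ++ [ab.1])) g0

-- body of A's inner 'for next_node in graph[current]' loop (state: (distance, queue))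
def fA (current : Int) (s : List Int × List Int) (nxt : Int) : List Int × List Int :=
  if PySem.List.pyGetD s.1 nxt 0 = -1 then
    (PySem.List.pySetD s.1 nxt (PySem.List.pyGetD s.1 current 0 + 1), s.2 ++ [nxt])
  else s

-- A's 'while queue:' loop; the fuel only makes the recursion total (2*(n+1)+1 provably suffices)
def bfsLoop (graph : List (List Int)) : Nat → List Int → List Int → List Int
  | 0, _, dist => dist
  | _ + 1, [], dist => dist
  | fuel + 1, current :: rest, dist =>
      let s := (PySem.List.pyGetD graph current []).foldl (fA current) (dist, rest)
      bfsLoop graph fuel s.2 s.1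

def solution (n : Int) (roads : List (Int × Int)) (sources : List Int) (destination : Int) : List Int :=
  let graph := buildGraph roads (List.replicate (n + 1).toNat ([] : List Int))
  let distance0 := PySem.List.pySetD (List.replicate (n + 1).toNat (-1 : Int)) destination 0
  let distance := bfsLoop graph (2 * (n + 1).toNat + 1) [destination] distance0
  sources.foldl (fun answer source => answer ++ [PySem.List.pyGetD distance source 0]) []

-- ===== PORT B =====

-- one 'if distance[a] != -1 and (…): distance[b] = distance[a] + 1; changed = True' step
def relax1 (s : List Int × Bool) (a b : Int) : List Int × Bool :=
  if PySem.List.pyGetD s.1 a 0 ≠ -1 ∧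
       (PySem.List.pyGetD s.1 b 0 = -1 ∨ PySem.List.pyGetD s.1 a 0 + 1 < PySem.List.pyGetD s.1 b 0)
  then (PySem.List.pySetD s.1 b (PySem.List.pyGetD s.1 a 0 + 1), true)
  else s

-- body of B's 'for a, b in roads' loop: relax the road in both directions
def relaxRoad (s : List Int × Bool) (ab : Int × Int) : List Int × Bool :=
  relax1 (relax1 s ab.1 ab.2) ab.2 ab.1

-- B's 'for _ in range(n): … if not changed: break' loop
def bfLoop (roads : List (Int × Int)) : Nat → List Int → List Int
  | 0, dist => dist
  | k + 1, dist =>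
      let s := roads.foldl relaxRoad (dist, false)
      if s.2 then bfLoop roads k s.1 else s.1

def solution_alt (n : Int) (roads : List (Int × Int)) (sources : List Int) (destination : Int) : List Int :=
  let distance0 := PySem.List.pySetD (List.replicate (n + 1).toNat (-1 : Int)) destination 0
  let distance := bfLoop roads n.toNat distance0
  sources.map (fun s => PySem.List.pyGetD distance s 0)

-- ===== PRECONDITION & SPEC =====
-- Pre_ is exactly A's non-raising set: n ≥ 0 and every node label (road endpoints, sources,
-- destination) a valid Python index into the length-(n+1) lists (IndexError otherwise).
def Pre_solution (n : Int) (roads : List (Int × Int)) (sources : List Int) (destination : Int) : Prop :=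
  0 ≤ n ∧
  (∀ p ∈ roads, PySem.Raise.InRange (n + 1).toNat p.1 ∧ PySem.Raise.InRange (n + 1).toNat p.2) ∧
  (∀ s ∈ sources, PySem.Raise.InRange (n + 1).toNat s) ∧
  PySem.Raise.InRange (n + 1).toNat destination

instance (n : Int) (roads : List (Int × Int)) (sources : List Int) (destination : Int) : Decidable (Pre_solution n roads sources destination) := by
  unfold Pre_solution; unfold PySem.Raise.InRange; infer_instance

def pvWitness_solution : Int × (List (Int × Int)) × List Int × Int := (4, [(1, 2), (2, 3), (3, 4)], [1, 2, 4, 0], 3)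

def Spec_solution (n : Int) (roads : List (Int × Int)) (sources : List Int) (destination : Int) (out : List Int) : Prop := out = solution_alt n roads sources destination
instance (n : Int) (roads : List (Int × Int)) (sources : List Int) (destination : Int) (out : List Int) : Decidable (Spec_solution n roads sources destination out) := by unfold Spec_solution; infer_instance

-- ===== CLAIM (what is proved, stated in full; the proofs are below) =====
def Claim_equal_solution : Prop := ∀ (n : Int) (roads : List (Int × Int)) (sources : List Int) (destination : Int), Dom_solution n roads sources destination → Pre_solution n roads sources destination → Spec_solution n roads sources destination (solution n roads sources destination)

-- ===== LEMMAS AND PROOFS =====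

-- the non-negative position a Python index i resolves to inside a list of length len
def resIdx (len : Nat) (i : Int) : Nat := if 0 ≤ i then i.toNat else len - (-i).toNat

theorem resIdx_lt {len : Nat} {i : Int} (h : PySem.Raise.InRange len i) : resIdx len i < len := by
  rcases h with ⟨h1, h2⟩; unfold resIdx; split <;> omega

theorem pyIdx?_inRange {len : Nat} {i : Int} (h : PySem.Raise.InRange len i) :
    PySem.List.pyIdx? len i = some (resIdx len i) := by
  rcases h with ⟨h1, h2⟩
  unfold PySem.List.pyIdx? resIdx
  split <;> simp_all

theorem pyGetD_inRange {α : Type} {xs : List α} {i : Int} (d : α) (h : PySem.Raise.InRange xs.length i) :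
    PySem.List.pyGetD xs i d = xs.getD (resIdx xs.length i) d := by
  simp [PySem.List.pyGetD, PySem.List.pyGet?, pyIdx?_inRange h, List.getD_eq_getElem?_getD]

theorem pySetD_inRange {α : Type} {xs : List α} {i : Int} (v : α) (h : PySem.Raise.InRange xs.length i) :
    PySem.List.pySetD xs i v = xs.set (resIdx xs.length i) v := by
  simp [PySem.List.pySetD, PySem.List.pySet?, pyIdx?_inRange h]

-- getD after set, same / different resolved position
theorem getD_set_self {α : Type} {xs : List α} {r : Nat} (h : r < xs.length) (v d : α) :
    (xs.set r v).getD r d = v := by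
  simp [List.getD_eq_getElem?_getD, List.getElem?_set_self (by simpa using h)]

theorem getD_set_ne {α : Type} {xs : List α} {r s : Nat} (h : r ≠ s) (v d : α) :
    (xs.set r v).getD s d = xs.getD s d := by
  simp [List.getD_eq_getElem?_getD, List.getElem?_set_ne h]

-- setting where the stored value differs from position j's value cannot touch position j
theorem pyGetD_pySetD_ne {xs : List Int} {i j : Int} (v : Int)
    (hi : PySem.Raise.InRange xs.length i) (hj : PySem.Raise.InRange xs.length j)
    (hne : PySem.List.pyGetD xs i 0 ≠ PySem.List.pyGetD xs j 0) :
    PySem.List.pyGetD (PySem.List.pySetD xs i v) j 0 = PySem.List.pyGetD xs j 0 := by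
  have hr : resIdx xs.length i ≠ resIdx xs.length j := by
    intro he
    apply hne
    rw [pyGetD_inRange 0 hi, pyGetD_inRange 0 hj, he]
  rw [pySetD_inRange v hi, pyGetD_inRange 0 hj] at *
  rw [show PySem.List.pyGetD (xs.set (resIdx xs.length i) v) j 0
      = (xs.set (resIdx xs.length i) v).getD (resIdx (xs.set (resIdx xs.length i) v).length j) 0 from
      pyGetD_inRange 0 (by simpa using hj)]
  simp only [List.length_set]
  exact getD_set_ne hr v 0

theorem pyGetD_pySetD_self {xs : List Int} {i : Int} (v : Int)
    (hi : PySem.Raise.InRange xs.length i) :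
    PySem.List.pyGetD (PySem.List.pySetD xs i v) i 0 = v := by
  rw [pySetD_inRange v hi]
  rw [show PySem.List.pyGetD (xs.set (resIdx xs.length i) v) i 0
      = (xs.set (resIdx xs.length i) v).getD (resIdx (xs.set (resIdx xs.length i) v).length i) 0 from
      pyGetD_inRange 0 (by simpa using hi)]
  simp only [List.length_set]
  exact getD_set_self (by simpa using resIdx_lt hi) v 0

theorem count_set_of_ne {xs : List Int} {r : Nat} (h : r < xs.length) (hx : xs.getD r 0 = -1)
    {v : Int} (hv : v ≠ -1) : (xs.set r v).count (-1) + 1 = xs.count (-1) := by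
  induction xs generalizing r with
  | nil => simp at h
  | cons a t ih =>
    cases r with
    | zero =>
      simp [List.getD_eq_getElem?_getD] at hx
      subst hx
      simp [hv]
    | succ r =>
      simp only [List.length_cons, Nat.add_lt_add_iff_right] at h
      simp only [List.getD_eq_getElem?_getD, List.getElem?_cons_succ] at hx
      have := ih h (by simpa [List.getD_eq_getElem?_getD] using hx)
      simp only [List.set_cons_succ, List.count_cons]
      omega

theorem count_pySetD {xs : List Int} {i : Int} (hi : PySem.Raise.InRange xs.length i)
    (hx : PySem.List.pyGetD xs i 0 = -1) {v : Int} (hv : v ≠ -1) :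
    (PySem.List.pySetD xs i v).count (-1) + 1 = xs.count (-1) := by
  rw [pySetD_inRange v hi]
  exact count_set_of_ne (resIdx_lt hi) (by rwa [pyGetD_inRange 0 hi] at hx) hv

-- ---- proof-only level-synchronous description of A's BFS (used as the semantic anchor) ----

-- one neighbour update at level d (state: (distance, next frontier))
def fB (d : Int) (s : List Int × List Int) (nb : Int) : List Int × List Int :=
  if PySem.List.pyGetD s.1 nb 0 = -1 then
    (PySem.List.pySetD s.1 nb (d + 1), s.2 ++ [nb])
  else s

def levelStep (graph : List (List Int)) (d : Int) (s : List Int × List Int) (node : Int) : List Int × List Int :=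
  (PySem.List.pyGetD graph node []).foldl (fB d) s

def levelLoop (graph : List (List Int)) : Nat → List Int → List Int → Int → List Int
  | 0, _, dist, _ => dist
  | _ + 1, [], dist, _ => dist
  | fuel + 1, f :: fs, dist, d =>
      let s := (f :: fs).foldl (levelStep graph d) (dist, ([] : List Int))
      levelLoop graph fuel s.2 s.1 (d + 1)

-- the final BFS distance array, level description
def levArr (n : Int) (roads : List (Int × Int)) (destination : Int) : List Int :=
  levelLoop (buildGraph roads (List.replicate (n + 1).toNat ([] : List Int)))
    ((n + 1).toNat + 2) [destination]
    (PySem.List.pySetD (List.replicate (n + 1).toNat (-1 : Int)) destination 0) 0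

-- ONE NODE: A's inner loop (queue accumulator) and the level description's inner loop
theorem inner_sim {c d : Int} (hd : 0 ≤ d) :
    ∀ (nbrs dist : List Int),
      (∀ x ∈ nbrs, PySem.Raise.InRange dist.length x) →
      PySem.Raise.InRange dist.length c →
      PySem.List.pyGetD dist c 0 = d →
      ∃ dist' new,
        (∀ ra : List Int, nbrs.foldl (fA c) (dist, ra) = (dist', ra ++ new)) ∧
        (∀ rb : List Int, nbrs.foldl (fB d) (dist, rb) = (dist', rb ++ new)) ∧
        dist'.length = dist.length ∧
        (∀ x, PySem.Raise.InRange dist.length x → PySem.List.pyGetD dist x 0 ≠ -1 →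
          PySem.List.pyGetD dist' x 0 = PySem.List.pyGetD dist x 0) ∧
        (∀ x ∈ new, PySem.Raise.InRange dist.length x ∧ PySem.List.pyGetD dist' x 0 = d + 1) ∧
        dist'.count (-1) + new.length = dist.count (-1) := by
  intro nbrs
  induction nbrs with
  | nil =>
    intro dist _ _ _
    exact ⟨dist, [], fun ra => by simp, fun rb => by simp, rfl, fun x _ _ => rfl, by simp, by simp⟩
  | cons nb t ih =>
    intro dist hn hc hcv
    by_cases hmiss : PySem.List.pyGetD dist nb 0 = -1
    · have hnb : PySem.Raise.InRange dist.length nb := hn nb (List.mem_cons_self ..)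
      have hlen1 : (PySem.List.pySetD dist nb (d + 1)).length = dist.length := PySem.List.length_pySetD ..
      have hkeep : ∀ x, PySem.Raise.InRange dist.length x → PySem.List.pyGetD dist x 0 ≠ -1 →
          PySem.List.pyGetD (PySem.List.pySetD dist nb (d + 1)) x 0 = PySem.List.pyGetD dist x 0 := by
        intro x hx hxv
        exact pyGetD_pySetD_ne _ hnb hx (by rw [hmiss]; exact fun he => hxv he.symm)
      have hc1 : PySem.List.pyGetD (PySem.List.pySetD dist nb (d + 1)) c 0 = d :=
        (hkeep c hc (by rw [hcv]; omega)).trans hcv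
      have hnb1 : PySem.List.pyGetD (PySem.List.pySetD dist nb (d + 1)) nb 0 = d + 1 :=
        pyGetD_pySetD_self _ hnb
      obtain ⟨dist', new, ha, hb, hlen, hp1, hp2, hcnt⟩ :=
        ih (PySem.List.pySetD dist nb (d + 1))
          (fun x hx => hlen1 ▸ hn x (List.mem_cons_of_mem _ hx)) (hlen1 ▸ hc) hc1
      have hc2 : (PySem.List.pySetD dist nb (d + 1)).count (-1) + 1 = dist.count (-1) :=
        count_pySetD hnb hmiss (by omega)
      refine ⟨dist', nb :: new, ?_, ?_, hlen.trans hlen1, ?_, ?_, ?_⟩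
      · intro ra
        simpa [fA, hmiss, hcv, List.append_assoc] using ha (ra ++ [nb])
      · intro rb
        simpa [fB, hmiss, List.append_assoc] using hb (rb ++ [nb])
      · intro x hx hxv
        have hx1 := hkeep x hx hxv
        rw [hp1 x (hlen1 ▸ hx) (hx1.trans_ne hxv), hx1]
      · intro x hx
        rcases List.mem_cons.mp hx with rfl | hx
        · exact ⟨hnb, (hp1 x (hlen1 ▸ hnb) (by rw [hnb1]; omega)).trans hnb1⟩
        · obtain ⟨h1, h2⟩ := hp2 x hx
          exact ⟨hlen1 ▸ h1, h2⟩
      · simp only [List.length_cons]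
        omega
    · obtain ⟨dist', new, ha, hb, hlen, hp1, hp2, hcnt⟩ := ih dist
        (fun x hx => hn x (List.mem_cons_of_mem _ hx)) hc hcv
      exact ⟨dist', new, fun ra => by simpa [fA, hmiss] using ha ra,
        fun rb => by simpa [fB, hmiss] using hb rb, hlen, hp1, hp2, hcnt⟩

theorem bfsLoop_nil (graph : List (List Int)) (fuel : Nat) (dist : List Int) :
    bfsLoop graph fuel [] dist = dist := by cases fuel <;> rfl

theorem levelLoop_nil (graph : List (List Int)) (fuel : Nat) (dist : List Int) (d : Int) :
    levelLoop graph fuel [] dist d = dist := by cases fuel <;> rfl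

-- ONE LEVEL: A's queue loop run across a whole frontier F equals the level fold over F
theorem level_sim {graph : List (List Int)} {len : Nat} {d : Int} (hd : 0 ≤ d)
    (hg : ∀ l ∈ graph, ∀ x ∈ l, PySem.Raise.InRange len x) (hglen : graph.length = len) :
    ∀ (F dist : List Int), dist.length = len →
      (∀ c ∈ F, PySem.Raise.InRange len c ∧ PySem.List.pyGetD dist c 0 = d) →
      ∃ dist' N,
        (∀ (fa : Nat) (Q : List Int),
          bfsLoop graph (fa + F.length) (F ++ Q) dist = bfsLoop graph fa (Q ++ N) dist') ∧
        (∀ qb, F.foldl (levelStep graph d) (dist, qb) = (dist', qb ++ N)) ∧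
        dist'.length = len ∧
        (∀ x, PySem.Raise.InRange len x → PySem.List.pyGetD dist x 0 ≠ -1 →
          PySem.List.pyGetD dist' x 0 = PySem.List.pyGetD dist x 0) ∧
        (∀ x ∈ N, PySem.Raise.InRange len x ∧ PySem.List.pyGetD dist' x 0 = d + 1) ∧
        dist'.count (-1) + N.length = dist.count (-1) := by
  intro F
  induction F with
  | nil =>
    intro dist hlen _
    exact ⟨dist, [], fun fa Q => by simp, fun qb => by simp, hlen,
      fun x _ _ => rfl, by simp, by simp⟩
  | cons c F' ih =>
    intro dist hlen hF
    obtain ⟨hcR, hcv⟩ := hF c (List.mem_cons_self ..)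
    have hnbrs : ∀ x ∈ PySem.List.pyGetD graph c [], PySem.Raise.InRange dist.length x := by
      intro x hx
      rw [hlen]
      have hcg : PySem.Raise.InRange graph.length c := by rw [hglen]; exact hcR
      have hmem : PySem.List.pyGetD graph c [] ∈ graph := PySem.List.pyGetD_mem graph [] hcg
      exact hg _ hmem x hx
    obtain ⟨dist1, new, ha1, hb1, hlen1, hp1, hp2, hcnt1⟩ :=
      inner_sim hd (PySem.List.pyGetD graph c []) dist hnbrs (hlen ▸ hcR) hcv
    obtain ⟨dist', N', ihA, ihB, hlen', hp1', hp2', hcnt'⟩ := ih dist1 (hlen1.trans hlen)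
      (fun c' hc' => by
        obtain ⟨h1, h2⟩ := hF c' (List.mem_cons_of_mem _ hc')
        exact ⟨h1, (hp1 c' (hlen ▸ h1) (by rw [h2]; omega)).trans h2⟩)
    refine ⟨dist', new ++ N', ?_, ?_, hlen', ?_, ?_, ?_⟩
    · intro fa Q
      have step : bfsLoop graph (fa + (c :: F').length) ((c :: F') ++ Q) dist
          = bfsLoop graph (fa + F'.length) ((F' ++ Q) ++ new) dist1 := by
        simp only [List.cons_append, List.length_cons,
          show fa + (F'.length + 1) = (fa + F'.length) + 1 from rfl]
        rw [show bfsLoop graph ((fa + F'.length) + 1) (c :: (F' ++ Q)) dist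
            = bfsLoop graph (fa + F'.length)
                ((PySem.List.pyGetD graph c []).foldl (fA c) (dist, F' ++ Q)).2
                ((PySem.List.pyGetD graph c []).foldl (fA c) (dist, F' ++ Q)).1 from rfl]
        rw [ha1 (F' ++ Q)]
      rw [step, show (F' ++ Q) ++ new = F' ++ (Q ++ new) from by simp, ihA fa (Q ++ new)]
      simp
    · intro qb
      have hstep : levelStep graph d (dist, qb) c = (dist1, qb ++ new) := hb1 qb
      rw [List.foldl_cons, hstep, ihB (qb ++ new)]
      simp
    · intro x hx hxv
      have hx1 := hp1 x (hlen ▸ hx) hxv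
      rw [hp1' x hx (hx1.trans_ne hxv), hx1]
    · intro x hx
      rcases List.mem_append.mp hx with hx | hx
      · obtain ⟨h1, h2⟩ := hp2 x hx
        exact ⟨hlen ▸ h1, (hp1' x (hlen ▸ h1) (by rw [h2]; omega)).trans h2⟩
      · exact hp2' x hx
    · simp only [List.length_append]
      omega

-- WHOLE TRAVERSAL: with sufficient fuel, A's queue loop equals the level loop
theorem loop_sim {graph : List (List Int)} {len : Nat}
    (hg : ∀ l ∈ graph, ∀ x ∈ l, PySem.Raise.InRange len x) (hglen : graph.length = len) :
    ∀ (fb fa : Nat) (F dist : List Int) (d : Int),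
      dist.length = len → 0 ≤ d →
      (∀ c ∈ F, PySem.Raise.InRange len c ∧ PySem.List.pyGetD dist c 0 = d) →
      2 * dist.count (-1) + F.length ≤ fa → dist.count (-1) + 1 ≤ fb →
      bfsLoop graph fa F dist = levelLoop graph fb F dist d := by
  intro fb
  induction fb with
  | zero => intro fa F dist d _ _ _ _ hfb; omega
  | succ fb ih =>
    intro fa F dist d hlen hd hF hfa hfb
    match F with
    | [] => rw [bfsLoop_nil, levelLoop_nil]
    | c :: F' =>
      obtain ⟨dist', N, hA, hB, hlen', hp1', hp2', hcnt'⟩ :=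
        level_sim hd hg hglen (c :: F') dist hlen hF
      have hflen : (c :: F').length ≤ fa := by simp only [List.length_cons] at hfa ⊢; omega
      have hAside : bfsLoop graph fa (c :: F') dist
          = bfsLoop graph (fa - (c :: F').length) N dist' := by
        have h1 : fa = (fa - (c :: F').length) + (c :: F').length := by omega
        calc bfsLoop graph fa (c :: F') dist
            = bfsLoop graph ((fa - (c :: F').length) + (c :: F').length) ((c :: F') ++ []) dist := by
              rw [← h1, List.append_nil]
          _ = bfsLoop graph (fa - (c :: F').length) ([] ++ N) dist' := hA _ []
          _ = bfsLoop graph (fa - (c :: F').length) N dist' := by rw [List.nil_append]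
      have hBside : levelLoop graph (fb + 1) (c :: F') dist d = levelLoop graph fb N dist' (d + 1) := by
        rw [show levelLoop graph (fb + 1) (c :: F') dist d
            = levelLoop graph fb ((c :: F').foldl (levelStep graph d) (dist, ([] : List Int))).2
                ((c :: F').foldl (levelStep graph d) (dist, ([] : List Int))).1 (d + 1) from rfl]
        rw [hB []]
        simp
      rw [hAside, hBside]
      match N, hp2', hcnt' with
      | [], _, _ => rw [bfsLoop_nil, levelLoop_nil]
      | x :: N', hp2', hcnt' =>
        apply ih
        · exact hlen'
        · omega
        · exact hp2'
        · simp only [List.length_cons] at hfa hcnt' ⊢; omega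
        · simp only [List.length_cons] at hfb hcnt' ⊢; omega

-- adjacency-list construction preserves length and keeps every stored label in range
theorem addEdge_pres {len : Nat} {g : List (List Int)} {u v : Int}
    (hlen : g.length = len) (hm : ∀ l ∈ g, ∀ x ∈ l, PySem.Raise.InRange len x)
    (hu : PySem.Raise.InRange len u) (hv : PySem.Raise.InRange len v) :
    (PySem.List.pySetD g u (PySem.List.pyGetD g u [] ++ [v])).length = len ∧
    ∀ l ∈ PySem.List.pySetD g u (PySem.List.pyGetD g u [] ++ [v]), ∀ x ∈ l,
      PySem.Raise.InRange len x := by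
  have hug : PySem.Raise.InRange g.length u := by rw [hlen]; exact hu
  refine ⟨by rw [PySem.List.length_pySetD, hlen], ?_⟩
  intro l hl x hx
  rw [pySetD_inRange _ hug] at hl
  rcases List.mem_or_eq_of_mem_set hl with hl | rfl
  · exact hm l hl x hx
  · rcases List.mem_append.mp hx with hx | hx
    · exact hm _ (PySem.List.pyGetD_mem g [] hug) x hx
    · rw [List.mem_singleton.mp hx]; exact hv

theorem buildGraph_facts {len : Nat} :
    ∀ (roads : List (Int × Int)) (g0 : List (List Int)),
      (∀ p ∈ roads, PySem.Raise.InRange len p.1 ∧ PySem.Raise.InRange len p.2) →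
      g0.length = len → (∀ l ∈ g0, ∀ x ∈ l, PySem.Raise.InRange len x) →
      (buildGraph roads g0).length = len ∧
      ∀ l ∈ buildGraph roads g0, ∀ x ∈ l, PySem.Raise.InRange len x := by
  intro roads
  induction roads with
  | nil => intro g0 _ h1 h2; exact ⟨h1, h2⟩
  | cons p rs ih =>
    intro g0 hr hlen hmem
    obtain ⟨h1, h2⟩ := hr p (List.mem_cons_self ..)
    obtain ⟨ha1, ha2⟩ := addEdge_pres hlen hmem h1 h2
    obtain ⟨hb1, hb2⟩ := addEdge_pres ha1 ha2 h2 h1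
    have hrec := ih _ (fun q hq => hr q (List.mem_cons_of_mem _ hq)) hb1 hb2
    simpa [buildGraph] using hrec

-- ---- semantic characterization of the BFS distance array ----

-- 'positions p and q are joined by some road' (both directions), in resolved positions
def adjR (len : Nat) (roads : List (Int × Int)) (p q : Nat) : Prop :=
  ∃ ab ∈ roads, (resIdx len ab.1 = p ∧ resIdx len ab.2 = q) ∨
                (resIdx len ab.2 = p ∧ resIdx len ab.1 = q)

-- D is THE distance array: 0 exactly at p0, values in [0, n] or -1, edge-closed, every
-- positive value has a parent one step closer
def GoodArr (len p0 : Nat) (nI : Int) (roads : List (Int × Int)) (D : List Int) : Prop :=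
  D.length = len ∧
  D.getD p0 0 = 0 ∧
  (∀ p, p < len → D.getD p 0 = 0 → p = p0) ∧
  (∀ p, p < len → D.getD p 0 = -1 ∨ (0 ≤ D.getD p 0 ∧ D.getD p 0 ≤ nI)) ∧
  (∀ p q, p < len → q < len → adjR len roads p q → D.getD p 0 ≠ -1 →
    D.getD q 0 ≠ -1 ∧ D.getD q 0 ≤ D.getD p 0 + 1) ∧
  (∀ p, p < len → 1 ≤ D.getD p 0 →
    ∃ q, q < len ∧ adjR len roads q p ∧ D.getD q 0 = D.getD p 0 - 1)

-- getD at an in-range position is getElem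
theorem getD_eq_get {α : Type} {xs : List α} {p : Nat} (hp : p < xs.length) (d : α) :
    xs.getD p d = xs[p] := by
  simp [List.getD_eq_getElem?_getD, List.getElem?_eq_getElem hp]

theorem eq_of_getD {s D : List Int} (hlen : s.length = D.length)
    (h : ∀ p, p < D.length → s.getD p 0 = D.getD p 0) : s = D := by
  apply List.ext_getElem hlen
  intro i h1 h2
  have := h i h2
  rwa [getD_eq_get h1, getD_eq_get h2] at this

theorem count_pos_of_getD {xs : List Int} {p : Nat} (hp : p < xs.length)
    (hx : xs.getD p 0 = -1) : 1 ≤ xs.count (-1) := by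
  rw [getD_eq_get hp] at hx
  have : (-1 : Int) ∈ xs := hx ▸ List.getElem_mem hp
  exact List.count_pos_iff.mpr this

theorem adjR_of_mem {len : Nat} {roads : List (Int × Int)} {ab : Int × Int} (h : ab ∈ roads) :
    adjR len roads (resIdx len ab.1) (resIdx len ab.2) ∧
    adjR len roads (resIdx len ab.2) (resIdx len ab.1) :=
  ⟨⟨ab, h, Or.inl ⟨rfl, rfl⟩⟩, ⟨ab, h, Or.inr ⟨rfl, rfl⟩⟩⟩

-- ---- the level loop establishes GoodArr ----

-- one adjacency-list append, in resolved form
theorem addEdge_getD {len : Nat} {g : List (List Int)} (hglen : g.length = len) {a : Int}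
    (ha : PySem.Raise.InRange len a) (v : Int) (p : Nat) :
    (PySem.List.pySetD g a (PySem.List.pyGetD g a [] ++ [v])).getD p []
    = if p = resIdx len a then g.getD p [] ++ [v] else g.getD p [] := by
  have haL : PySem.Raise.InRange g.length a := by rw [hglen]; exact ha
  rw [pySetD_inRange _ haL, pyGetD_inRange [] haL, hglen]
  by_cases he : p = resIdx len a
  · subst he
    rw [getD_set_self (by rw [hglen]; exact resIdx_lt ha), if_pos rfl]
  · rw [getD_set_ne (fun h => he h.symm), if_neg he]

-- the adjacency list at p holds exactly the road partners of p
theorem buildGraph_getD_mem {len : Nat} :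
    ∀ (roads : List (Int × Int)) (g0 : List (List Int)),
      (∀ ab ∈ roads, PySem.Raise.InRange len ab.1 ∧ PySem.Raise.InRange len ab.2) →
      g0.length = len → ∀ p, p < len → ∀ x : Int,
      (x ∈ (buildGraph roads g0).getD p [] ↔
        x ∈ g0.getD p [] ∨ ∃ ab ∈ roads,
          (resIdx len ab.1 = p ∧ ab.2 = x) ∨ (resIdx len ab.2 = p ∧ ab.1 = x)) := by
  intro roads
  induction roads with
  | nil =>
    intro g0 _ _ p _ x
    simp [buildGraph]
  | cons ab rs ih =>
    intro g0 hr hlen p hp x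
    obtain ⟨ha, hb⟩ := hr ab (List.mem_cons_self ..)
    have hlen1 : (PySem.List.pySetD g0 ab.1 (PySem.List.pyGetD g0 ab.1 [] ++ [ab.2])).length = len := by
      rw [PySem.List.length_pySetD, hlen]
    have hlen2 : (PySem.List.pySetD (PySem.List.pySetD g0 ab.1 (PySem.List.pyGetD g0 ab.1 [] ++ [ab.2]))
        ab.2 (PySem.List.pyGetD (PySem.List.pySetD g0 ab.1 (PySem.List.pyGetD g0 ab.1 [] ++ [ab.2])) ab.2 [] ++ [ab.1])).length = len := by
      rw [PySem.List.length_pySetD, hlen1]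
    have hstep : buildGraph (ab :: rs) g0
        = buildGraph rs (PySem.List.pySetD (PySem.List.pySetD g0 ab.1 (PySem.List.pyGetD g0 ab.1 [] ++ [ab.2]))
            ab.2 (PySem.List.pyGetD (PySem.List.pySetD g0 ab.1 (PySem.List.pyGetD g0 ab.1 [] ++ [ab.2])) ab.2 [] ++ [ab.1])) := rfl
    rw [hstep, ih _ (fun q hq => hr q (List.mem_cons_of_mem _ hq)) hlen2 p hp x]
    rw [addEdge_getD hlen1 (a := ab.2) hb ab.1 p, addEdge_getD hlen (a := ab.1) ha ab.2 p]
    constructor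
    · intro h
      rcases h with h | ⟨cd, hcd, hor⟩
      · split at h
        · rcases List.mem_append.mp h with h | h
          · split at h
            · rcases List.mem_append.mp h with h | h
              · exact Or.inl h
              · exact Or.inr ⟨ab, List.mem_cons_self .., Or.inl ⟨Eq.symm (by assumption), (List.mem_singleton.mp h).symm⟩⟩
            · exact Or.inl h
          · exact Or.inr ⟨ab, List.mem_cons_self .., Or.inr ⟨Eq.symm (by assumption), (List.mem_singleton.mp h).symm⟩⟩
        · split at h
          · rcases List.mem_append.mp h with h | h
            · exact Or.inl h
            · exact Or.inr ⟨ab, List.mem_cons_self .., Or.inl ⟨Eq.symm (by assumption), (List.mem_singleton.mp h).symm⟩⟩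
          · exact Or.inl h
      · exact Or.inr ⟨cd, List.mem_cons_of_mem _ hcd, hor⟩
    · intro h
      have base : ∀ y, y ∈ g0.getD p [] → y ∈
          (if p = resIdx len ab.2
           then (if p = resIdx len ab.1 then g0.getD p [] ++ [ab.2] else g0.getD p []) ++ [ab.1]
           else if p = resIdx len ab.1 then g0.getD p [] ++ [ab.2] else g0.getD p []) := by
        intro y hy
        split
        · refine List.mem_append.mpr (Or.inl ?_)
          split
          · exact List.mem_append.mpr (Or.inl hy)
          · exact hy
        · split
          · exact List.mem_append.mpr (Or.inl hy)
          · exact hy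
      rcases h with h | ⟨cd, hcd, hor⟩
      · exact Or.inl (base x h)
      · rcases List.mem_cons.mp hcd with rfl | hcd'
        · rcases hor with ⟨h1, h2⟩ | ⟨h1, h2⟩
          · subst h2
            left
            split
            · refine List.mem_append.mpr (Or.inl ?_)
              rw [if_pos h1.symm]
              exact List.mem_append.mpr (Or.inr (List.mem_singleton.mpr rfl))
            · rw [if_pos h1.symm]
              exact List.mem_append.mpr (Or.inr (List.mem_singleton.mpr rfl))
          · subst h2
            left
            rw [if_pos h1.symm]
            exact List.mem_append.mpr (Or.inr (List.mem_singleton.mpr rfl))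
        · exact Or.inr ⟨cd, hcd', hor⟩

theorem replicate_nil_getD (len : Nat) (p : Nat) :
    (List.replicate len ([] : List Int)).getD p [] = [] := by
  simp [List.getD_eq_getElem?_getD, List.getElem?_replicate]
  split <;> rfl

-- the per-level invariant of A's BFS
def LInv (len p0 : Nat) (nI : Int) (roads : List (Int × Int)) (F dist : List Int) (d : Int) : Prop :=
  p0 < len ∧
  dist.length = len ∧ 0 ≤ d ∧ dist.getD p0 0 = 0 ∧
  (∀ p, p < len → dist.getD p 0 = 0 → p = p0) ∧
  (∀ v ∈ F, PySem.Raise.InRange len v ∧ dist.getD (resIdx len v) 0 = d) ∧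
  (∀ p, p < len → dist.getD p 0 = d → ∃ v ∈ F, resIdx len v = p) ∧
  (∀ p, p < len → dist.getD p 0 = -1 ∨ (0 ≤ dist.getD p 0 ∧ dist.getD p 0 ≤ d ∧ dist.getD p 0 ≤ nI)) ∧
  (F ≠ [] → d + (dist.count (-1) : Int) ≤ nI) ∧
  (∀ p q, p < len → q < len → adjR len roads p q → dist.getD p 0 ≠ -1 → dist.getD p 0 < d →
    dist.getD q 0 ≠ -1 ∧ dist.getD q 0 ≤ dist.getD p 0 + 1) ∧
  (∀ p, p < len → 1 ≤ dist.getD p 0 →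
    ∃ q, q < len ∧ adjR len roads q p ∧ dist.getD q 0 = dist.getD p 0 - 1)

theorem LInv_final {len p0 : Nat} {nI : Int} {roads : List (Int × Int)} {dist : List Int} {d : Int}
    (h : LInv len p0 nI roads [] dist d) : GoodArr len p0 nI roads dist := by
  obtain ⟨g0, g1, g2, g3, g4, _, g6, g7, _, g9, g10⟩ := h
  refine ⟨g1, g3, g4, ?_, ?_, g10⟩
  · intro p hp
    rcases g7 p hp with h | ⟨ha, _, hc⟩
    · exact Or.inl h
    · exact Or.inr ⟨ha, hc⟩
  · intro p q hp hq hadj hne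
    have hle : dist.getD p 0 ≤ d := by
      rcases g7 p hp with h | ⟨_, hb, _⟩
      · exact absurd h hne
      · exact hb
    have hlt : dist.getD p 0 < d := by
      rcases eq_or_lt_of_le hle with he | hl
      · obtain ⟨v, hv, _⟩ := g6 p hp he
        exact absurd hv (List.not_mem_nil)
      · exact hl
    exact g9 p q hp hq hadj hne hlt

-- the within-level state: writes so far are exactly d+1 entries on old -1 slots, recorded in N
def WInv (len : Nat) (roads : List (Int × Int)) (dist : List Int) (d : Int)
    (c N : List Int) : Prop :=
  c.length = len ∧
  (∀ p, p < len → c.getD p 0 = dist.getD p 0 ∨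
    (dist.getD p 0 = -1 ∧ c.getD p 0 = d + 1 ∧ ∃ v ∈ N, resIdx len v = p)) ∧
  (∀ v ∈ N, PySem.Raise.InRange len v ∧ c.getD (resIdx len v) 0 = d + 1 ∧
    dist.getD (resIdx len v) 0 = -1 ∧
    ∃ q, q < len ∧ adjR len roads q (resIdx len v) ∧ dist.getD q 0 = d) ∧
  c.count (-1) + N.length = dist.count (-1)

-- expanding one node's neighbour list
theorem fB_fold {len : Nat} {roads : List (Int × Int)} {dist : List Int} {d : Int}
    (hd : 0 ≤ d)
    (hrange : ∀ p, p < len → dist.getD p 0 ≤ d)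
    {uq : Nat} (huq : uq < len) (hval : dist.getD uq 0 = d) :
    ∀ (xs c N : List Int),
      (∀ x ∈ xs, PySem.Raise.InRange len x ∧ adjR len roads uq (resIdx len x)) →
      WInv len roads dist d c N →
      WInv len roads dist d (xs.foldl (fB d) (c, N)).1 (xs.foldl (fB d) (c, N)).2 ∧
      (∀ p, p < len → c.getD p 0 ≠ -1 → (xs.foldl (fB d) (c, N)).1.getD p 0 = c.getD p 0) ∧
      (∀ x ∈ xs, (xs.foldl (fB d) (c, N)).1.getD (resIdx len x) 0 ≠ -1 ∧
        (xs.foldl (fB d) (c, N)).1.getD (resIdx len x) 0 ≤ d + 1) := by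
  intro xs
  induction xs with
  | nil =>
    intro c N _ hW
    exact ⟨hW, fun _ _ _ => rfl, by simp⟩
  | cons x t ih =>
    intro c N hxs hW
    obtain ⟨hxR, hxadj⟩ := hxs x (List.mem_cons_self ..)
    obtain ⟨w1, w2, w3, w4⟩ := hW
    have hx' : resIdx len x < len := resIdx_lt hxR
    have hgx : PySem.List.pyGetD c x 0 = c.getD (resIdx len x) 0 := by
      rw [pyGetD_inRange 0 (by rw [w1]; exact hxR), w1]
    by_cases hm : c.getD (resIdx len x) 0 = -1
    · -- newly discovered
      have hsx : PySem.List.pySetD c x (d + 1) = c.set (resIdx len x) (d + 1) := by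
        rw [pySetD_inRange _ (by rw [w1]; exact hxR), w1]
      have hstep : fB d (c, N) x = (c.set (resIdx len x) (d + 1), N ++ [x]) := by
        unfold fB
        rw [show PySem.List.pyGetD (c, N).1 x 0 = c.getD (resIdx len x) 0 from hgx]
        rw [if_pos hm]
        rw [show PySem.List.pySetD (c, N).1 x (d + 1) = c.set (resIdx len x) (d + 1) from hsx]
      have hdistx : dist.getD (resIdx len x) 0 = -1 := by
        rcases w2 _ hx' with he | ⟨_, hc2, _⟩
        · rw [← he]; exact hm
        · rw [hc2] at hm; omega
      have hxlt : resIdx len x < c.length := by rw [w1]; exact hx'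
      have hW2 : WInv len roads dist d (c.set (resIdx len x) (d + 1)) (N ++ [x]) := by
        refine ⟨by rw [List.length_set, w1], ?_, ?_, ?_⟩
        · intro p hp
          by_cases he : p = resIdx len x
          · subst he
            exact Or.inr ⟨hdistx, getD_set_self hxlt _ _,
              x, List.mem_append.mpr (Or.inr (List.mem_singleton.mpr rfl)), rfl⟩
          · rw [getD_set_ne (fun h => he h.symm)]
            rcases w2 p hp with h | ⟨h1, h2, v, hv, hvp⟩
            · exact Or.inl h
            · exact Or.inr ⟨h1, h2, v, List.mem_append.mpr (Or.inl hv), hvp⟩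
        · intro v hv
          rcases List.mem_append.mp hv with hv | hv
          · obtain ⟨hvR, hvc, hvd, hpar⟩ := w3 v hv
            have hne : resIdx len v ≠ resIdx len x := by
              intro he
              rw [he, hm] at hvc
              omega
            exact ⟨hvR, by rw [getD_set_ne (fun h => hne h.symm)]; exact hvc, hvd, hpar⟩
          · rw [List.mem_singleton.mp hv]
            exact ⟨hxR, getD_set_self hxlt _ _, hdistx, uq, huq, hxadj, hval⟩
        · have := count_set_of_ne hxlt (by rw [getD_eq_get hxlt] at hm ⊢; exact hm)
            (v := d + 1) (by omega)
          simp only [List.length_append, List.length_singleton]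
          omega
      have hfold : (x :: t).foldl (fB d) (c, N)
          = t.foldl (fB d) (c.set (resIdx len x) (d + 1), N ++ [x]) := by
        rw [List.foldl_cons, hstep]
      obtain ⟨ihW, ihpres, ihclos⟩ := ih _ _ (fun y hy => hxs y (List.mem_cons_of_mem _ hy)) hW2
      rw [hfold]
      refine ⟨ihW, ?_, ?_⟩
      · intro p hp hpne
        have hne : p ≠ resIdx len x := by
          intro he
          rw [he] at hpne
          exact hpne hm
        have h1 : (c.set (resIdx len x) (d + 1)).getD p 0 = c.getD p 0 :=
          getD_set_ne (fun h => hne h.symm) _ _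
        rw [ihpres p hp (by rw [h1]; exact hpne), h1]
      · intro y hy
        rcases List.mem_cons.mp hy with rfl | hy'
        · have h1 : (c.set (resIdx len y) (d + 1)).getD (resIdx len y) 0 = d + 1 :=
            getD_set_self hxlt _ _
          have h2 := ihpres (resIdx len y) hx' (by rw [h1]; omega)
          rw [h2, h1]
          exact ⟨by omega, le_refl _⟩
        · exact ihclos y hy'
    · -- already visited: skip
      have hstep : fB d (c, N) x = (c, N) := by
        unfold fB
        rw [show PySem.List.pyGetD (c, N).1 x 0 = c.getD (resIdx len x) 0 from hgx]
        rw [if_neg hm]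
      have hfold : (x :: t).foldl (fB d) (c, N) = t.foldl (fB d) (c, N) := by
        rw [List.foldl_cons, hstep]
      obtain ⟨ihW, ihpres, ihclos⟩ := ih _ _ (fun y hy => hxs y (List.mem_cons_of_mem _ hy))
        ⟨w1, w2, w3, w4⟩
      rw [hfold]
      refine ⟨ihW, ihpres, ?_⟩
      intro y hy
      rcases List.mem_cons.mp hy with rfl | hy'
      · have hle : c.getD (resIdx len y) 0 ≤ d + 1 := by
          rcases w2 _ hx' with he | ⟨_, hc2, _⟩
          · rw [he]
            have := hrange _ hx'
            omega
          · omega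
        rw [ihpres _ hx' hm]
        exact ⟨hm, hle⟩
      · exact ihclos y hy'

-- expanding a whole frontier
theorem levelStep_fold {len : Nat} {roads : List (Int × Int)} {graph : List (List Int)}
    {dist : List Int} {d : Int}
    (hd : 0 ≤ d) (hglen : graph.length = len)
    (hrange : ∀ p, p < len → dist.getD p 0 ≤ d)
    (hg1 : ∀ p, p < len → ∀ x ∈ graph.getD p [],
      PySem.Raise.InRange len x ∧ adjR len roads p (resIdx len x)) :
    ∀ (F2 c N : List Int),
      (∀ v ∈ F2, PySem.Raise.InRange len v ∧ dist.getD (resIdx len v) 0 = d) →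
      WInv len roads dist d c N →
      WInv len roads dist d (F2.foldl (levelStep graph d) (c, N)).1
        (F2.foldl (levelStep graph d) (c, N)).2 ∧
      (∀ p, p < len → c.getD p 0 ≠ -1 →
        (F2.foldl (levelStep graph d) (c, N)).1.getD p 0 = c.getD p 0) ∧
      (∀ u ∈ F2, ∀ x ∈ graph.getD (resIdx len u) [],
        (F2.foldl (levelStep graph d) (c, N)).1.getD (resIdx len x) 0 ≠ -1 ∧
        (F2.foldl (levelStep graph d) (c, N)).1.getD (resIdx len x) 0 ≤ d + 1) := by
  intro F2
  induction F2 with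
  | nil =>
    intro c N _ hW
    exact ⟨hW, fun _ _ _ => rfl, by simp⟩
  | cons u t ih =>
    intro c N hF hW
    obtain ⟨huR, huval⟩ := hF u (List.mem_cons_self ..)
    have hu' : resIdx len u < len := resIdx_lt huR
    have hgu : PySem.List.pyGetD graph u [] = graph.getD (resIdx len u) [] := by
      rw [pyGetD_inRange [] (by rw [hglen]; exact huR), hglen]
    have hstep : levelStep graph d (c, N)  u
        = (graph.getD (resIdx len u) []).foldl (fB d) (c, N) := by
      unfold levelStep
      rw [show PySem.List.pyGetD graph u [] = graph.getD (resIdx len u) [] from hgu]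
    obtain ⟨hW1, hpres1, hclos1⟩ :=
      fB_fold hd hrange hu' huval (graph.getD (resIdx len u) []) c N (hg1 _ hu') hW
    set r := (graph.getD (resIdx len u) []).foldl (fB d) (c, N) with hr
    have hfold : (u :: t).foldl (levelStep graph d) (c, N)
        = t.foldl (levelStep graph d) (r.1, r.2) := by
      rw [List.foldl_cons, hstep]
    obtain ⟨ihW, ihpres, ihclos⟩ := ih r.1 r.2 (fun v hv => hF v (List.mem_cons_of_mem _ hv)) hW1
    rw [hfold]
    refine ⟨ihW, ?_, ?_⟩
    · intro p hp hpne
      rw [ihpres p hp (by rw [hpres1 p hp hpne]; exact hpne), hpres1 p hp hpne]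
    · intro v hv x hx
      rcases List.mem_cons.mp hv with rfl | hv'
      · obtain ⟨h1, h2⟩ := hclos1 x hx
        have hx' : resIdx len x < len := resIdx_lt (hg1 _ hu' x hx).1
        rw [ihpres _ hx' h1]
        exact ⟨h1, h2⟩
      · exact ihclos v hv' x hx

-- one full level preserves the invariant
theorem round_lemma {len p0 : Nat} {nI : Int} {roads : List (Int × Int)} {graph : List (List Int)}
    (hglen : graph.length = len)
    (hg1 : ∀ p, p < len → ∀ x ∈ graph.getD p [],
      PySem.Raise.InRange len x ∧ adjR len roads p (resIdx len x))
    (hg2 : ∀ p q, p < len → q < len → adjR len roads p q →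
      ∃ x ∈ graph.getD p [], resIdx len x = q)
    {F dist : List Int} {d : Int}
    (hL : LInv len p0 nI roads F dist d) (hFne : F ≠ []) :
    LInv len p0 nI roads (F.foldl (levelStep graph d) (dist, [])).2
      (F.foldl (levelStep graph d) (dist, [])).1 (d + 1) ∧
    (F.foldl (levelStep graph d) (dist, [])).1.count (-1)
      + (F.foldl (levelStep graph d) (dist, [])).2.length = dist.count (-1) := by
  obtain ⟨g0, g1, g2, g3, g4, g5, g6, g7, g8, g9, g10⟩ := hL
  have hrange : ∀ p, p < len → dist.getD p 0 ≤ d := by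
    intro p hp
    rcases g7 p hp with h | ⟨_, hb, _⟩
    · omega
    · exact hb
  have hW0 : WInv len roads dist d dist [] := by
    refine ⟨g1, fun p _ => Or.inl rfl, ?_, by simp⟩
    intro v hv
    exact absurd hv (List.not_mem_nil)
  obtain ⟨hW, hpres, hclosF⟩ := levelStep_fold g2 hglen hrange hg1 F dist [] g5 hW0
  obtain ⟨w1, w2, w3, w4⟩ := hW
  refine ⟨⟨g0, w1, by omega, ?_, ?_, ?_, ?_, ?_, ?_, ?_, ?_⟩, w4⟩
  · -- destination keeps 0
    rcases w2 p0 g0 with he | ⟨h1, _, _⟩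
    · rw [he]; exact g3
    · rw [g3] at h1; omega
  · -- only the destination has 0
    intro p hp hz
    rcases w2 p hp with he | ⟨_, h2, _⟩
    · exact g4 p hp (by rw [← he]; exact hz)
    · rw [hz] at h2; omega
  · -- new frontier members carry d+1
    intro v hv
    obtain ⟨hvR, hvc, _, _⟩ := w3 v hv
    exact ⟨hvR, hvc⟩
  · -- everything at d+1 is in the new frontier
    intro p hp hz
    rcases w2 p hp with he | ⟨_, _, v, hv, hvp⟩
    · exfalso
      rw [he] at hz
      rcases g7 p hp with h | ⟨_, hb, _⟩ <;> omega
    · exact ⟨v, hv, hvp⟩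
  · -- value range
    intro p hp
    rcases w2 p hp with he | ⟨h1, h2, _⟩
    · rw [he]
      rcases g7 p hp with h | ⟨ha, hb, hc⟩
      · exact Or.inl h
      · exact Or.inr ⟨ha, by omega, hc⟩
    · refine Or.inr ⟨by omega, by omega, ?_⟩
      have hcnt : 1 ≤ dist.count (-1) := count_pos_of_getD (by rw [g1]; exact hp) h1
      have := g8 hFne
      rw [h2]
      omega
  · -- level budget
    intro hNe
    have hlenN : 1 ≤ (F.foldl (levelStep graph d) (dist, [])).2.length :=
      List.length_pos_iff.mpr hNe
    have := g8 hFne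
    omega
  · -- closure below the new level
    intro p q hp hq hadj hpne hplt
    rcases w2 p hp with he | ⟨_, h2, _⟩
    · have hle : dist.getD p 0 ≤ d := hrange p hp
      by_cases hpd : dist.getD p 0 = d
      · obtain ⟨v, hv, hvp⟩ := g6 p hp hpd
        obtain ⟨x, hx, hxq⟩ := hg2 p q hp hq hadj
        have hc := hclosF v hv x (by rw [hvp]; exact hx)
        rw [hxq] at hc
        rw [he, hpd]
        exact ⟨hc.1, by omega⟩
      · have hdne : dist.getD p 0 ≠ -1 := by rw [← he]; exact hpne
        obtain ⟨hqne, hqle⟩ := g9 p q hp hq hadj hdne (by omega)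
        rcases w2 q hq with heq | ⟨hq1, _, _⟩
        · rw [he, heq]
          exact ⟨hqne, hqle⟩
        · exact absurd hq1 hqne
    · omega
  · -- parents
    intro p hp h1c
    rcases w2 p hp with he | ⟨_, hv, v, hvN, hvp⟩
    · have h1d : 1 ≤ dist.getD p 0 := by rw [← he]; exact h1c
      obtain ⟨q, hq, hadj, hqv⟩ := g10 p hp h1d
      have hqne : dist.getD q 0 ≠ -1 := by omega
      rcases w2 q hq with heq | ⟨hq1, _, _⟩
      · exact ⟨q, hq, hadj, by rw [heq, hqv, he]⟩
      · exact absurd hq1 hqne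
    · obtain ⟨_, _, _, q, hq, hadj, hqd⟩ := w3 v hvN
      rcases w2 q hq with heq | ⟨hq1, _, _⟩
      · refine ⟨q, hq, by rw [← hvp]; exact hadj, by rw [heq, hqd, hv]; ring⟩
      · rw [hq1] at hqd; omega

-- the whole loop
theorem levelLoop_good {len p0 : Nat} {nI : Int} {roads : List (Int × Int)} {graph : List (List Int)}
    (hglen : graph.length = len)
    (hg1 : ∀ p, p < len → ∀ x ∈ graph.getD p [],
      PySem.Raise.InRange len x ∧ adjR len roads p (resIdx len x))
    (hg2 : ∀ p q, p < len → q < len → adjR len roads p q →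
      ∃ x ∈ graph.getD p [], resIdx len x = q) :
    ∀ (fuel : Nat) (F dist : List Int) (d : Int),
      LInv len p0 nI roads F dist d → dist.count (-1) + 1 ≤ fuel →
      GoodArr len p0 nI roads (levelLoop graph fuel F dist d) := by
  intro fuel
  induction fuel with
  | zero => intro F dist d _ h; omega
  | succ fuel ih =>
    intro F dist d hL hfuel
    match F with
    | [] =>
      rw [levelLoop_nil]
      exact LInv_final hL
    | f :: fs =>
      have hFne : (f :: fs) ≠ ([] : List Int) := by simp
      obtain ⟨hL', hcnt⟩ := round_lemma hglen hg1 hg2 hL hFne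
      have hstep : levelLoop graph (fuel + 1) (f :: fs) dist d
          = levelLoop graph fuel ((f :: fs).foldl (levelStep graph d) (dist, [])).2
              ((f :: fs).foldl (levelStep graph d) (dist, [])).1 (d + 1) := rfl
      rw [hstep]
      by_cases hN2 : ((f :: fs).foldl (levelStep graph d) (dist, [])).2 = []
      · rw [hN2, levelLoop_nil]
        rw [hN2] at hL'
        exact LInv_final hL'
      · have hlenN : 1 ≤ ((f :: fs).foldl (levelStep graph d) (dist, [])).2.length :=
          List.length_pos_iff.mpr hN2
        exact ih _ _ _ hL' (by omega)

-- initial-state facts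
theorem dist0_getD {n destination : Int} (hdest : PySem.Raise.InRange (n + 1).toNat destination) :
    ∀ p, p < (n + 1).toNat →
      (PySem.List.pySetD (List.replicate (n + 1).toNat (-1 : Int)) destination 0).getD p 0
      = if p = resIdx (n + 1).toNat destination then 0 else -1 := by
  have hrep : (List.replicate (n + 1).toNat (-1 : Int)).length = (n + 1).toNat := by simp
  have hset : PySem.List.pySetD (List.replicate (n + 1).toNat (-1 : Int)) destination 0
      = (List.replicate (n + 1).toNat (-1 : Int)).set (resIdx (n + 1).toNat destination) 0 := by
    rw [pySetD_inRange 0 (by rw [hrep]; exact hdest), hrep]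
  intro p hp
  rw [hset]
  by_cases he : p = resIdx (n + 1).toNat destination
  · subst he
    rw [getD_set_self (by rw [hrep]; exact resIdx_lt hdest), if_pos rfl]
  · rw [getD_set_ne (fun h => he h.symm), if_neg he, getD_eq_get (by rw [hrep]; exact hp)]
    simp

theorem dist0_count {n destination : Int} (hn : 0 ≤ n)
    (hdest : PySem.Raise.InRange (n + 1).toNat destination) :
    ((PySem.List.pySetD (List.replicate (n + 1).toNat (-1 : Int)) destination 0).count (-1) : Int)
      = n := by
  have hrep : (List.replicate (n + 1).toNat (-1 : Int)).length = (n + 1).toNat := by simp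
  have hdR : PySem.Raise.InRange (List.replicate (n + 1).toNat (-1 : Int)).length destination := by
    rw [hrep]; exact hdest
  have hRget : PySem.List.pyGetD (List.replicate (n + 1).toNat (-1 : Int)) destination 0 = -1 := by
    rw [pyGetD_inRange 0 hdR]
    have := resIdx_lt hdR
    rw [hrep] at this
    rw [getD_eq_get (by rw [hrep]; exact this)]
    simp
  have hc := count_pySetD hdR hRget (v := 0) (by omega)
  have hcR : (List.replicate (n + 1).toNat (-1 : Int)).count (-1) = (n + 1).toNat := by
    simp
  rw [hcR] at hc
  omega

theorem lev_good {n : Int} {roads : List (Int × Int)} {destination : Int}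
    (hn : 0 ≤ n)
    (hroads : ∀ p ∈ roads, PySem.Raise.InRange (n + 1).toNat p.1 ∧ PySem.Raise.InRange (n + 1).toNat p.2)
    (hdest : PySem.Raise.InRange (n + 1).toNat destination) :
    GoodArr (n + 1).toNat (resIdx (n + 1).toNat destination) n roads (levArr n roads destination) := by
  have hrepg : (List.replicate (n + 1).toNat ([] : List Int)).length = (n + 1).toNat := by simp
  obtain ⟨hglen, _⟩ := buildGraph_facts roads (List.replicate (n + 1).toNat ([] : List Int))
    hroads hrepg (by intro l hl x hx; rw [List.eq_of_mem_replicate hl] at hx; simp at hx)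
  have hchar := fun p hp x => buildGraph_getD_mem roads (List.replicate (n + 1).toNat ([] : List Int))
    hroads hrepg p hp x
  have hg1 : ∀ p, p < (n + 1).toNat →
      ∀ x ∈ (buildGraph roads (List.replicate (n + 1).toNat ([] : List Int))).getD p [],
      PySem.Raise.InRange (n + 1).toNat x ∧ adjR (n + 1).toNat roads p (resIdx (n + 1).toNat x) := by
    intro p hp x hx
    rcases (hchar p hp x).mp hx with h | ⟨ab, hab, hor⟩
    · rw [replicate_nil_getD] at h
      exact absurd h (List.not_mem_nil)
    · rcases hor with ⟨h1, h2⟩ | ⟨h1, h2⟩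
      · subst h2
        exact ⟨(hroads ab hab).2, ⟨ab, hab, Or.inl ⟨h1, rfl⟩⟩⟩
      · subst h2
        exact ⟨(hroads ab hab).1, ⟨ab, hab, Or.inr ⟨h1, rfl⟩⟩⟩
  have hg2 : ∀ p q, p < (n + 1).toNat → q < (n + 1).toNat → adjR (n + 1).toNat roads p q →
      ∃ x ∈ (buildGraph roads (List.replicate (n + 1).toNat ([] : List Int))).getD p [],
        resIdx (n + 1).toNat x = q := by
    intro p q hp hq hadj
    obtain ⟨ab, hab, hor⟩ := hadj
    rcases hor with ⟨h1, h2⟩ | ⟨h1, h2⟩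
    · exact ⟨ab.2, (hchar p hp ab.2).mpr (Or.inr ⟨ab, hab, Or.inl ⟨h1, rfl⟩⟩), h2⟩
    · exact ⟨ab.1, (hchar p hp ab.1).mpr (Or.inr ⟨ab, hab, Or.inr ⟨h1, rfl⟩⟩), h2⟩
  have hp0 : resIdx (n + 1).toNat destination < (n + 1).toNat := resIdx_lt hdest
  have hd0c := dist0_getD hdest
  have hd0cnt := dist0_count hn hdest
  have hd0len : (PySem.List.pySetD (List.replicate (n + 1).toNat (-1 : Int)) destination 0).length
      = (n + 1).toNat := by
    rw [PySem.List.length_pySetD]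
    simp
  have hL0 : LInv (n + 1).toNat (resIdx (n + 1).toNat destination) n roads [destination]
      (PySem.List.pySetD (List.replicate (n + 1).toNat (-1 : Int)) destination 0) 0 := by
    refine ⟨hp0, hd0len, le_refl 0, ?_, ?_, ?_, ?_, ?_, ?_, ?_, ?_⟩
    · rw [hd0c _ hp0, if_pos rfl]
    · intro p hp hz
      rw [hd0c p hp] at hz
      by_cases he : p = resIdx (n + 1).toNat destination
      · exact he
      · rw [if_neg he] at hz
        omega
    · intro v hv
      rw [List.mem_singleton.mp hv]
      exact ⟨hdest, by rw [hd0c _ hp0, if_pos rfl]⟩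
    · intro p hp hz
      rw [hd0c p hp] at hz
      by_cases he : p = resIdx (n + 1).toNat destination
      · exact ⟨destination, List.mem_singleton.mpr rfl, he.symm⟩
      · rw [if_neg he] at hz
        omega
    · intro p hp
      rw [hd0c p hp]
      by_cases he : p = resIdx (n + 1).toNat destination
      · rw [if_pos he]
        exact Or.inr ⟨le_refl 0, le_refl 0, hn⟩
      · rw [if_neg he]
        exact Or.inl rfl
    · intro _
      rw [hd0cnt]
      omega
    · intro p q hp hq _ hpne hplt
      exfalso
      rw [hd0c p hp] at hpne hplt
      by_cases he : p = resIdx (n + 1).toNat destination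
      · rw [if_pos he] at hplt
        omega
      · rw [if_neg he] at hpne
        exact hpne rfl
    · intro p hp h1
      exfalso
      rw [hd0c p hp] at h1
      by_cases he : p = resIdx (n + 1).toNat destination
      · rw [if_pos he] at h1
        omega
      · rw [if_neg he] at h1
        omega
  unfold levArr
  exact levelLoop_good hglen hg1 hg2 ((n + 1).toNat + 2) [destination] _ 0 hL0 (by omega)


-- Bellman-Ford state invariant: every set entry is an upper bound on the true distance
def BFInv (len : Nat) (D s : List Int) : Prop :=
  ∀ p, p < len → s.getD p 0 ≠ -1 → D.getD p 0 ≠ -1 ∧ D.getD p 0 ≤ s.getD p 0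

-- a single 'relax a→b': keeps BFInv, keeps locked-to-D entries, and locks b when a is
-- locked exactly one level below b
theorem relax1_main {len p0 : Nat} {nI : Int} {roads : List (Int × Int)} {D : List Int}
    (hD : GoodArr len p0 nI roads D)
    {s : List Int} (ch : Bool) {a b : Int}
    (hlen : s.length = len)
    (ha : PySem.Raise.InRange len a) (hb : PySem.Raise.InRange len b)
    (hadj : adjR len roads (resIdx len a) (resIdx len b))
    (hInv : BFInv len D s) :
    (relax1 (s, ch) a b).1.length = len ∧
    BFInv len D (relax1 (s, ch) a b).1 ∧
    (∀ p, p < len → D.getD p 0 ≠ -1 → s.getD p 0 = D.getD p 0 →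
      (relax1 (s, ch) a b).1.getD p 0 = D.getD p 0) ∧
    (D.getD (resIdx len a) 0 ≠ -1 → s.getD (resIdx len a) 0 = D.getD (resIdx len a) 0 →
      D.getD (resIdx len b) 0 = D.getD (resIdx len a) 0 + 1 →
      (relax1 (s, ch) a b).1.getD (resIdx len b) 0 = D.getD (resIdx len b) 0) := by
  obtain ⟨hDlen, hD0, hDzero, hDrange, hDclos, hDpar⟩ := hD
  have ha' : resIdx len a < len := resIdx_lt ha
  have hb' : resIdx len b < len := resIdx_lt hb
  have hga : PySem.List.pyGetD s a 0 = s.getD (resIdx len a) 0 := by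
    rw [pyGetD_inRange 0 (by rw [hlen]; exact ha), hlen]
  have hgb : PySem.List.pyGetD s b 0 = s.getD (resIdx len b) 0 := by
    rw [pyGetD_inRange 0 (by rw [hlen]; exact hb), hlen]
  have hset : ∀ v : Int, PySem.List.pySetD s b v = s.set (resIdx len b) v := by
    intro v
    rw [pySetD_inRange v (by rw [hlen]; exact hb), hlen]
  have hrel : relax1 (s, ch) a b =
      if s.getD (resIdx len a) 0 ≠ -1 ∧ (s.getD (resIdx len b) 0 = -1 ∨
          s.getD (resIdx len a) 0 + 1 < s.getD (resIdx len b) 0)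
      then (s.set (resIdx len b) (s.getD (resIdx len a) 0 + 1), true)
      else (s, ch) := by
    unfold relax1
    rw [show (PySem.List.pyGetD (s, ch).1 a 0) = s.getD (resIdx len a) 0 from hga,
        show (PySem.List.pyGetD (s, ch).1 b 0) = s.getD (resIdx len b) 0 from hgb]
    split
    · rw [show PySem.List.pySetD (s, ch).1 b (s.getD (resIdx len a) 0 + 1)
          = s.set (resIdx len b) (s.getD (resIdx len a) 0 + 1) from hset _]
    · rfl
  by_cases hc : s.getD (resIdx len a) 0 ≠ -1 ∧ (s.getD (resIdx len b) 0 = -1 ∨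
      s.getD (resIdx len a) 0 + 1 < s.getD (resIdx len b) 0)
  · rw [hrel, if_pos hc]
    obtain ⟨hca, hcb⟩ := hc
    obtain ⟨hDa, hDale⟩ := hInv _ ha' hca
    obtain ⟨hDb, hDble⟩ := hDclos _ _ ha' hb' hadj hDa
    have hbs : resIdx len b < s.length := by rw [hlen]; exact hb'
    refine ⟨by rw [List.length_set, hlen], ?_, ?_, ?_⟩
    · intro p hp hne
      by_cases hpb : p = resIdx len b
      · subst hpb
        rw [getD_set_self hbs]
        exact ⟨hDb, by omega⟩
      · rw [getD_set_ne (fun h => hpb h.symm)] at hne ⊢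
        exact hInv _ hp hne
    · intro p hp hDp hsp
      by_cases hpb : p = resIdx len b
      · subst hpb
        exfalso
        rw [hsp] at hcb
        rcases hcb with h | h
        · exact hDp h
        · omega
      · rw [getD_set_ne (fun h => hpb h.symm)]
        exact hsp
    · intro _ hsa hstep
      rw [getD_set_self hbs, hsa, hstep]
  · rw [hrel, if_neg hc]
    push_neg at hc
    refine ⟨hlen, hInv, fun p _ _ hsp => hsp, ?_⟩
    intro hDa hsa hstep
    have hsa' : s.getD (resIdx len a) 0 ≠ -1 := by rw [hsa]; exact hDa
    obtain ⟨hne, hle⟩ := hc hsa'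
    obtain ⟨_, hDble⟩ := hInv _ hb' hne
    rw [hsa] at hle
    show s.getD (resIdx len b) 0 = D.getD (resIdx len b) 0
    omega

-- both directions of one road
theorem relaxRoad_main {len p0 : Nat} {nI : Int} {roads : List (Int × Int)} {D : List Int}
    (hD : GoodArr len p0 nI roads D)
    {s : List Int} (ch : Bool) {ab : Int × Int}
    (hlen : s.length = len) (hmem : ab ∈ roads)
    (ha : PySem.Raise.InRange len ab.1) (hb : PySem.Raise.InRange len ab.2)
    (hInv : BFInv len D s) :
    (relaxRoad (s, ch) ab).1.length = len ∧
    BFInv len D (relaxRoad (s, ch) ab).1 ∧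
    (∀ p, p < len → D.getD p 0 ≠ -1 → s.getD p 0 = D.getD p 0 →
      (relaxRoad (s, ch) ab).1.getD p 0 = D.getD p 0) ∧
    (∀ q p : Nat,
      ((resIdx len ab.1 = q ∧ resIdx len ab.2 = p) ∨ (resIdx len ab.2 = q ∧ resIdx len ab.1 = p)) →
      D.getD q 0 ≠ -1 → D.getD p 0 = D.getD q 0 + 1 → s.getD q 0 = D.getD q 0 →
      (relaxRoad (s, ch) ab).1.getD p 0 = D.getD p 0) := by
  obtain ⟨hadj1, hadj2⟩ := adjR_of_mem (len := len) hmem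
  obtain ⟨hlen1, hInv1, hkeep1, hlock1⟩ := relax1_main hD ch hlen ha hb hadj1 hInv
  set r := relax1 (s, ch) ab.1 ab.2 with hr
  have hr2 : relaxRoad (s, ch) ab = relax1 (r.1, r.2) ab.2 ab.1 := rfl
  obtain ⟨hlen2, hInv2, hkeep2, hlock2⟩ := relax1_main hD r.2 hlen1 hb ha hadj2 hInv1
  rw [hr2]
  refine ⟨hlen2, hInv2, ?_, ?_⟩
  · intro p hp hDp hsp
    exact hkeep2 p hp hDp (hkeep1 p hp hDp hsp)
  · intro q p hor hDq hstep hsq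
    have hDp : D.getD p 0 ≠ -1 := by
      obtain ⟨hDlen, hD0, hDzero, hDrange, hDclos, hDpar⟩ := hD
      have hq' : q < len := by
        rcases hor with ⟨h1, _⟩ | ⟨h1, _⟩ <;> rw [← h1]
        · exact resIdx_lt ha
        · exact resIdx_lt hb
      rcases hDrange q hq' with h | h
      · exact absurd h hDq
      · intro he
        rw [hstep] at he
        omega
    rcases hor with ⟨h1, h2⟩ | ⟨h1, h2⟩
    · -- relax ab.1→ab.2 locks p = resIdx ab.2 already in the first step
      subst h1; subst h2
      have hlk := hlock1 hDq hsq hstep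
      exact hkeep2 _ (resIdx_lt hb) hDp hlk
    · -- the second relax ab.2→ab.1 locks p = resIdx ab.1
      subst h1; subst h2
      have hsq1 : r.1.getD (resIdx len ab.2) 0 = D.getD (resIdx len ab.2) 0 :=
        hkeep1 _ (resIdx_lt hb) hDq hsq
      exact hlock2 hDq hsq1 hstep

-- a sweep keeps BFInv and every locked entry
theorem bf_fold_keep {len p0 : Nat} {nI : Int} {roads : List (Int × Int)} {D : List Int}
    (hD : GoodArr len p0 nI roads D)
    (hroadsR : ∀ ab ∈ roads, PySem.Raise.InRange len ab.1 ∧ PySem.Raise.InRange len ab.2) :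
    ∀ (es : List (Int × Int)), (∀ ab ∈ es, ab ∈ roads) → ∀ (s : List Int) (ch : Bool),
    s.length = len → BFInv len D s →
    (es.foldl relaxRoad (s, ch)).1.length = len ∧
    BFInv len D (es.foldl relaxRoad (s, ch)).1 ∧
    (∀ p, p < len → D.getD p 0 ≠ -1 → s.getD p 0 = D.getD p 0 →
      (es.foldl relaxRoad (s, ch)).1.getD p 0 = D.getD p 0) := by
  intro es
  induction es with
  | nil => intro _ s ch hlen hInv; exact ⟨hlen, hInv, fun _ _ _ h => h⟩
  | cons e t ih =>
    intro hsub s ch hlen hInv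
    have hmem : e ∈ roads := hsub e (List.mem_cons_self ..)
    obtain ⟨ha, hb⟩ := hroadsR e hmem
    obtain ⟨hlen1, hInv1, hkeep1, _⟩ := relaxRoad_main hD ch hlen hmem ha hb hInv
    set r := relaxRoad (s, ch) e with hr
    have heq : (e :: t).foldl relaxRoad (s, ch) = t.foldl relaxRoad (r.1, r.2) := rfl
    obtain ⟨hlen2, hInv2, hkeep2⟩ := ih (fun ab h => hsub ab (List.mem_cons_of_mem _ h)) r.1 r.2 hlen1 hInv1
    rw [heq]
    exact ⟨hlen2, hInv2, fun p hp hDp hsp => hkeep2 p hp hDp (hkeep1 p hp hDp hsp)⟩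

-- a sweep containing the parent road of p locks p
theorem bf_fold_lock {len p0 : Nat} {nI : Int} {roads : List (Int × Int)} {D : List Int}
    (hD : GoodArr len p0 nI roads D)
    (hroadsR : ∀ ab ∈ roads, PySem.Raise.InRange len ab.1 ∧ PySem.Raise.InRange len ab.2) :
    ∀ (es : List (Int × Int)), (∀ ab ∈ es, ab ∈ roads) → ∀ (s : List Int) (ch : Bool),
    s.length = len → BFInv len D s →
    ∀ (ab : Int × Int) (q p : Nat), ab ∈ es →
    ((resIdx len ab.1 = q ∧ resIdx len ab.2 = p) ∨ (resIdx len ab.2 = q ∧ resIdx len ab.1 = p)) →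
    D.getD q 0 ≠ -1 → D.getD p 0 = D.getD q 0 + 1 → s.getD q 0 = D.getD q 0 →
    (es.foldl relaxRoad (s, ch)).1.getD p 0 = D.getD p 0 := by
  intro es
  induction es with
  | nil => intro _ _ _ _ _ _ _ _ h; exact absurd h (List.not_mem_nil)
  | cons e t ih =>
    intro hsub s ch hlen hInv ab q p hab hor hDq hstep hsq
    have hmem : e ∈ roads := hsub e (List.mem_cons_self ..)
    obtain ⟨ha, hb⟩ := hroadsR e hmem
    obtain ⟨hlen1, hInv1, hkeep1, hlock1⟩ := relaxRoad_main hD ch hlen hmem ha hb hInv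
    set r := relaxRoad (s, ch) e with hr
    have heq : (e :: t).foldl relaxRoad (s, ch) = t.foldl relaxRoad (r.1, r.2) := rfl
    have hp' : p < len := by
      rcases hor with ⟨_, h2⟩ | ⟨_, h2⟩ <;> rw [← h2]
      · exact resIdx_lt (hroadsR ab (hsub ab hab)).2
      · exact resIdx_lt (hroadsR ab (hsub ab hab)).1
    have hq' : q < len := by
      rcases hor with ⟨h1, _⟩ | ⟨h1, _⟩ <;> rw [← h1]
      · exact resIdx_lt (hroadsR ab (hsub ab hab)).1
      · exact resIdx_lt (hroadsR ab (hsub ab hab)).2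
    have hDp : D.getD p 0 ≠ -1 := by
      intro he
      rw [hstep] at he
      obtain ⟨_, _, _, hDrange, _, _⟩ := hD
      rcases hDrange q hq' with h | h
      · exact hDq h
      · omega
    rcases List.mem_cons.mp hab with rfl | hab'
    · -- the parent road is the head: lock now, keep afterwards
      have hlocked := hlock1 q p hor hDq hstep hsq
      rw [heq]
      exact (bf_fold_keep hD hroadsR t (fun x h => hsub x (List.mem_cons_of_mem _ h))
        r.1 r.2 hlen1 hInv1).2.2 p hp' hDp hlocked
    · -- the parent road is in the tail: q stays locked through the head
      have hsq1 : r.1.getD q 0 = D.getD q 0 := hkeep1 q hq' hDq hsq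
      rw [heq]
      exact ih (fun x h => hsub x (List.mem_cons_of_mem _ h)) r.1 r.2 hlen1 hInv1
        ab q p hab' hor hDq hstep hsq1

-- flag bookkeeping: a sweep reporting no change really changed nothing, and then no
-- relaxation was possible at all
theorem relax1_flag_true {s : List Int} {a b : Int} :
    (relax1 (s, true) a b).2 = true := by
  unfold relax1; split <;> rfl

theorem relax1_false {s : List Int} {ch : Bool} {a b : Int}
    (h : (relax1 (s, ch) a b).2 = false) :
    relax1 (s, ch) a b = (s, ch) ∧ ch = false ∧
    ¬(PySem.List.pyGetD s a 0 ≠ -1 ∧ (PySem.List.pyGetD s b 0 = -1 ∨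
      PySem.List.pyGetD s a 0 + 1 < PySem.List.pyGetD s b 0)) := by
  unfold relax1 at *
  split at h
  · simp at h
  · exact ⟨by rw [if_neg (by assumption)], h, by assumption⟩

theorem relaxRoad_flag_true {s : List Int} {ab : Int × Int} :
    (relaxRoad (s, true) ab).2 = true := by
  unfold relaxRoad
  have h1 : relax1 (s, true) ab.1 ab.2 = ((relax1 (s, true) ab.1 ab.2).1, true) := by
    have := relax1_flag_true (s := s) (a := ab.1) (b := ab.2)
    exact Prod.ext rfl this
  rw [h1]
  exact relax1_flag_true

theorem fold_flag_true {es : List (Int × Int)} :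
    ∀ s : List Int, (es.foldl relaxRoad (s, true)).2 = true := by
  induction es with
  | nil => intro s; rfl
  | cons e t ih =>
    intro s
    have h1 : relaxRoad (s, true) e = ((relaxRoad (s, true) e).1, true) :=
      Prod.ext rfl relaxRoad_flag_true
    show (t.foldl relaxRoad (relaxRoad (s, true) e)).2 = true
    rw [h1]
    exact ih _

theorem relaxRoad_false {s : List Int} {ab : Int × Int}
    (h : (relaxRoad (s, false) ab).2 = false) :
    relaxRoad (s, false) ab = (s, false) ∧
    ¬(PySem.List.pyGetD s ab.1 0 ≠ -1 ∧ (PySem.List.pyGetD s ab.2 0 = -1 ∨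
      PySem.List.pyGetD s ab.1 0 + 1 < PySem.List.pyGetD s ab.2 0)) ∧
    ¬(PySem.List.pyGetD s ab.2 0 ≠ -1 ∧ (PySem.List.pyGetD s ab.1 0 = -1 ∨
      PySem.List.pyGetD s ab.2 0 + 1 < PySem.List.pyGetD s ab.1 0)) := by
  have hrr : relaxRoad (s, false) ab
      = relax1 ((relax1 (s, false) ab.1 ab.2).1, (relax1 (s, false) ab.1 ab.2).2) ab.2 ab.1 := rfl
  rw [hrr] at h
  obtain ⟨ho1, ho2, ho3⟩ := relax1_false h
  obtain ⟨hi1, _, hi3⟩ := relax1_false ho2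
  have hfst : (relax1 (s, false) ab.1 ab.2).1 = s := by rw [hi1]
  constructor
  · rw [hrr, ho1, hfst, hi1]
  · rw [hfst] at ho3
    exact ⟨hi3, ho3⟩

theorem bf_fold_false :
    ∀ (es : List (Int × Int)) (s : List Int),
    (es.foldl relaxRoad (s, false)).2 = false →
    es.foldl relaxRoad (s, false) = (s, false) ∧
    ∀ ab ∈ es,
      ¬(PySem.List.pyGetD s ab.1 0 ≠ -1 ∧ (PySem.List.pyGetD s ab.2 0 = -1 ∨
        PySem.List.pyGetD s ab.1 0 + 1 < PySem.List.pyGetD s ab.2 0)) ∧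
      ¬(PySem.List.pyGetD s ab.2 0 ≠ -1 ∧ (PySem.List.pyGetD s ab.1 0 = -1 ∨
        PySem.List.pyGetD s ab.2 0 + 1 < PySem.List.pyGetD s ab.1 0)) := by
  intro es
  induction es with
  | nil => intro s _; exact ⟨rfl, fun ab h => absurd h (List.not_mem_nil)⟩
  | cons e t ih =>
    intro s h
    have heq : (e :: t).foldl relaxRoad (s, false) = t.foldl relaxRoad (relaxRoad (s, false) e) := rfl
    by_cases hf : (relaxRoad (s, false) e).2 = true
    · exfalso
      have h1 : relaxRoad (s, false) e = ((relaxRoad (s, false) e).1, true) := Prod.ext rfl hf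
      rw [heq, h1, fold_flag_true] at h
      simp at h
    · have hf' : (relaxRoad (s, false) e).2 = false := Bool.eq_false_iff.mpr hf
      obtain ⟨he1, he2, he3⟩ := relaxRoad_false hf'
      rw [heq, he1] at h
      obtain ⟨ht1, ht2⟩ := ih s h
      refine ⟨by rw [heq, he1, ht1], ?_⟩
      intro ab hab
      rcases List.mem_cons.mp hab with rfl | hab'
      · exact ⟨he2, he3⟩
      · exact ht2 ab hab'

-- a relax-free state with correct value at the destination IS the distance array
theorem fp_eq {len p0 : Nat} {nI : Int} {roads : List (Int × Int)} {D : List Int}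
    (hD : GoodArr len p0 nI roads D)
    {s : List Int} (hlen : s.length = len) (hInv : BFInv len D s)
    (h0 : s.getD p0 0 = 0)
    (hclos : ∀ p q, p < len → q < len → adjR len roads p q → s.getD p 0 ≠ -1 →
      s.getD q 0 ≠ -1 ∧ s.getD q 0 ≤ s.getD p 0 + 1) :
    s = D := by
  obtain ⟨hDlen, hD0, hDzero, hDrange, hDclos, hDpar⟩ := hD
  have key : ∀ (j : Nat) (p : Nat), p < len → D.getD p 0 = (j : Int) → s.getD p 0 = D.getD p 0 := by
    intro j
    induction j with
    | zero =>
      intro p hp hDp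
      have := hDzero p hp (by exact_mod_cast hDp)
      subst this
      rw [h0, hDp]
      rfl
    | succ j ih =>
      intro p hp hDp
      obtain ⟨q, hq, hadj, hDq⟩ := hDpar p hp (by rw [hDp]; push_cast; omega)
      have hDqv : D.getD q 0 = (j : Int) := by rw [hDq, hDp]; push_cast; ring
      have hsq : s.getD q 0 = D.getD q 0 := ih q hq hDqv
      have hsqne : s.getD q 0 ≠ -1 := by rw [hsq, hDqv]; omega
      obtain ⟨hspne, hsple⟩ := hclos q p hq hp hadj hsqne
      obtain ⟨_, hDle⟩ := hInv p hp hspne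
      rw [hsq, hDqv] at hsple
      rw [hDp] at hDle ⊢
      omega
  apply eq_of_getD (by rw [hlen, hDlen])
  intro p hpD
  have hp : p < len := by rwa [hDlen] at hpD
  rcases hDrange p hp with hm | ⟨h1, _⟩
  · rw [hm]
    by_cases hs : s.getD p 0 = -1
    · rw [hs]
    · exact absurd hm (hInv p hp hs).1
  · exact key (D.getD p 0).toNat p hp (by omega)

-- the Bellman-Ford loop converges to the distance array
theorem bfLoop_eq {len p0 : Nat} {nI : Int} {roads : List (Int × Int)} {D : List Int}
    (hD : GoodArr len p0 nI roads D) (hp0 : p0 < len)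
    (hroadsR : ∀ ab ∈ roads, PySem.Raise.InRange len ab.1 ∧ PySem.Raise.InRange len ab.2) :
    ∀ (fuel : Nat) (k : Int) (s : List Int), 0 ≤ k → s.length = len → BFInv len D s →
    (∀ p, p < len → D.getD p 0 ≠ -1 → D.getD p 0 ≤ k → s.getD p 0 = D.getD p 0) →
    nI ≤ k + fuel →
    bfLoop roads fuel s = D := by
  obtain ⟨hDlen, hD0, hDzero, hDrange, hDclos, hDpar⟩ := id hD
  intro fuel
  induction fuel with
  | zero =>
    intro k s hk hlen hInv hlock hfuel
    show s = D
    apply eq_of_getD (by rw [hlen, hDlen])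
    intro p hpD
    have hp : p < len := by rwa [hDlen] at hpD
    rcases hDrange p hp with hm | ⟨h1, h2⟩
    · rw [hm]
      by_cases hs : s.getD p 0 = -1
      · rw [hs]
      · exact absurd hm (hInv p hp hs).1
    · exact hlock p hp (by omega) (by push_cast at hfuel; omega)
  | succ fuel ih =>
    intro k s hk hlen hInv hlock hfuel
    have hbf : bfLoop roads (fuel + 1) s =
        if (roads.foldl relaxRoad (s, false)).2 then bfLoop roads fuel (roads.foldl relaxRoad (s, false)).1
        else (roads.foldl relaxRoad (s, false)).1 := rfl
    set r := roads.foldl relaxRoad (s, false) with hr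
    obtain ⟨hlen1, hInv1, hkeep1⟩ :=
      bf_fold_keep hD hroadsR roads (fun _ h => h) s false hlen hInv
    have hlock1 : ∀ p, p < len → D.getD p 0 ≠ -1 → D.getD p 0 ≤ k + 1 → r.1.getD p 0 = D.getD p 0 := by
      intro p hp hDp hDk
      by_cases hle : D.getD p 0 ≤ k
      · exact hkeep1 p hp hDp (hlock p hp hDp hle)
      · have hDv : D.getD p 0 = k + 1 := by omega
        have h1 : 1 ≤ D.getD p 0 := by omega
        obtain ⟨q, hq, hadj, hDq⟩ := hDpar p hp h1
        obtain ⟨ab, hab, hor⟩ := hadj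
        have hDqne : D.getD q 0 ≠ -1 := by
          rcases hDrange q hq with h | h
          · rw [hDq, hDv] at *; omega
          · omega
        have hsq : s.getD q 0 = D.getD q 0 := hlock q hq hDqne (by rw [hDq]; omega)
        exact bf_fold_lock hD hroadsR roads (fun _ h => h) s false hlen hInv ab q p hab hor hDqne
          (by rw [hDq]; ring) hsq
    rw [hbf]
    by_cases hflag : r.2 = true
    · rw [if_pos hflag]
      exact ih (k + 1) r.1 (by omega) hlen1 hInv1 hlock1 (by push_cast; push_cast at hfuel; omega)
    · have hflag' : r.2 = false := Bool.eq_false_iff.mpr hflag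
      rw [if_neg (by rw [hflag']; exact Bool.false_ne_true)]
      obtain ⟨hsame, hnc⟩ := bf_fold_false roads s (by rw [← hr]; exact hflag')
      have hr1 : r.1 = s := by rw [hr, hsame]
      rw [hr1]
      have h0 : s.getD p0 0 = 0 := by
        have hres := hlock p0 hp0 (by rw [hD0]; omega) (by rw [hD0]; omega)
        rw [hres, hD0]
      apply fp_eq hD hlen hInv h0
      intro p q hp hq hadj hsp
      obtain ⟨ab, hab, hor⟩ := hadj
      obtain ⟨hn1, hn2⟩ := hnc ab hab
      obtain ⟨haR, hbR⟩ := hroadsR ab hab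
      have hga : PySem.List.pyGetD s ab.1 0 = s.getD (resIdx len ab.1) 0 := by
        rw [pyGetD_inRange 0 (by rw [hlen]; exact haR), hlen]
      have hgb : PySem.List.pyGetD s ab.2 0 = s.getD (resIdx len ab.2) 0 := by
        rw [pyGetD_inRange 0 (by rw [hlen]; exact hbR), hlen]
      rw [hga, hgb] at hn1 hn2
      push_neg at hn1 hn2
      rcases hor with ⟨h1, h2⟩ | ⟨h1, h2⟩
      · subst h1; subst h2
        obtain ⟨hx, hy⟩ := hn1 hsp
        exact ⟨hx, by omega⟩
      · subst h1; subst h2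
        obtain ⟨hx, hy⟩ := hn2 hsp
        exact ⟨hx, by omega⟩

theorem bf_eq_good {n : Int} {roads : List (Int × Int)} {destination : Int} {D : List Int}
    (hn : 0 ≤ n)
    (hroads : ∀ p ∈ roads, PySem.Raise.InRange (n + 1).toNat p.1 ∧ PySem.Raise.InRange (n + 1).toNat p.2)
    (hdest : PySem.Raise.InRange (n + 1).toNat destination)
    (hD : GoodArr (n + 1).toNat (resIdx (n + 1).toNat destination) n roads D) :
    bfLoop roads n.toNat (PySem.List.pySetD (List.replicate (n + 1).toNat (-1 : Int)) destination 0) = D := by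
  obtain ⟨hDlen, hD0, hDzero, hDrange, hDclos, hDpar⟩ := id hD
  have hp0 : resIdx (n + 1).toNat destination < (n + 1).toNat := resIdx_lt hdest
  have hrep : (List.replicate (n + 1).toNat (-1 : Int)).length = (n + 1).toNat := by simp
  have hset : PySem.List.pySetD (List.replicate (n + 1).toNat (-1 : Int)) destination 0
      = (List.replicate (n + 1).toNat (-1 : Int)).set (resIdx (n + 1).toNat destination) 0 := by
    rw [pySetD_inRange 0 (by rw [hrep]; exact hdest), hrep]
  have hlen0 : ((List.replicate (n + 1).toNat (-1 : Int)).set (resIdx (n + 1).toNat destination) 0).length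
      = (n + 1).toNat := by simp
  have hchar : ∀ p, p < (n + 1).toNat →
      ((List.replicate (n + 1).toNat (-1 : Int)).set (resIdx (n + 1).toNat destination) 0).getD p 0
      = if p = resIdx (n + 1).toNat destination then 0 else -1 := by
    intro p hp
    by_cases he : p = resIdx (n + 1).toNat destination
    · subst he
      rw [getD_set_self (by rw [hrep]; exact hp0), if_pos rfl]
    · rw [getD_set_ne (fun h => he h.symm), if_neg he, getD_eq_get (by rw [hrep]; exact hp)]
      simp
  rw [hset]
  refine bfLoop_eq hD hp0 hroads n.toNat 0 _ le_rfl hlen0 ?_ ?_ ?_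
  · intro p hp hne
    rw [hchar p hp] at hne
    by_cases he : p = resIdx (n + 1).toNat destination
    · subst he
      refine ⟨by rw [hD0]; omega, ?_⟩
      rw [hchar _ hp0, if_pos rfl, hD0]
    · rw [if_neg he] at hne
      exact absurd rfl hne
  · intro p hp hDne hDle
    have h0' : D.getD p 0 = 0 := by
      rcases hDrange p hp with h | h
      · exact absurd h hDne
      · omega
    have hpe := hDzero p hp h0'
    rw [hchar p hp, if_pos hpe, h0']
  · omega

-- A's result, described through the level loop
theorem solutionA_map {n : Int} {roads : List (Int × Int)} {sources : List Int} {destination : Int}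
    (hpre : Pre_solution n roads sources destination) :
    solution n roads sources destination
      = sources.map (fun s => PySem.List.pyGetD (levArr n roads destination) s 0) := by
  obtain ⟨hn, hroads, hsources, hdest⟩ := hpre
  unfold solution
  obtain ⟨hglen, hg⟩ := buildGraph_facts roads (List.replicate (n + 1).toNat ([] : List Int))
    hroads (by simp) (by intro l hl x hx; rw [List.eq_of_mem_replicate hl] at hx; simp at hx)
  have hRlen : (List.replicate (n + 1).toNat (-1 : Int)).length = (n + 1).toNat := by simp
  have hdR : PySem.Raise.InRange (List.replicate (n + 1).toNat (-1 : Int)).length destination := by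
    rw [hRlen]; exact hdest
  have h0len : (PySem.List.pySetD (List.replicate (n + 1).toNat (-1 : Int)) destination 0).length
      = (n + 1).toNat := by rw [PySem.List.length_pySetD, hRlen]
  have h0val : PySem.List.pyGetD
      (PySem.List.pySetD (List.replicate (n + 1).toNat (-1 : Int)) destination 0) destination 0 = 0 :=
    pyGetD_pySetD_self _ hdR
  have hRget : PySem.List.pyGetD (List.replicate (n + 1).toNat (-1 : Int)) destination 0 = -1 := by
    rw [pyGetD_inRange 0 hdR]
    have := resIdx_lt hdR
    rw [hRlen] at this
    simp [List.getD_eq_getElem?_getD, this]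
  have h0cnt : (PySem.List.pySetD (List.replicate (n + 1).toNat (-1 : Int)) destination 0).count (-1)
      + 1 = (n + 1).toNat := by
    have := count_pySetD hdR hRget (v := 0) (by omega)
    simpa using this
  show sources.foldl (fun answer source => answer ++ [PySem.List.pyGetD
      (bfsLoop (buildGraph roads (List.replicate (n + 1).toNat [])) (2 * (n + 1).toNat + 1)
        [destination] (PySem.List.pySetD (List.replicate (n + 1).toNat (-1)) destination 0))
      source 0]) []
    = sources.map (fun s => PySem.List.pyGetD (levArr n roads destination) s 0)
  unfold levArr
  rw [loop_sim hg hglen ((n + 1).toNat + 2) (2 * (n + 1).toNat + 1) [destination] _ 0 h0len le_rfl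
    (by intro c hc; rw [List.mem_singleton.mp hc]; exact ⟨hdest, h0val⟩)
    (by simp only [List.length_cons, List.length_nil]; omega) (by omega)]
  rw [PySem.List.foldl_append_singleton_eq_map, List.nil_append]

-- ===== VERDICT (by name: the statement is the Claim_ definition above) =====
theorem solution_spec : Claim_equal_solution := by
  intro n roads sources destination _ hpre
  obtain ⟨hn, hroads, hsources, hdest⟩ := hpre
  unfold Spec_solution
  rw [solutionA_map ⟨hn, hroads, hsources, hdest⟩]
  show _ = sources.map (fun s => PySem.List.pyGetD
      (bfLoop roads n.toNat
        (PySem.List.pySetD (List.replicate (n + 1).toNat (-1 : Int)) destination 0)) s 0)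
  rw [bf_eq_good hn hroads hdest (lev_good hn hroads hdest)]
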